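-- pv_equiv track=rewrite | github.com/egtaishwaryapattar/AdventOfCode24 | Day2/Day2.py | is_line_safe
-- ===== SOURCE A (Python) =====
-- def is_diff_valid(diff, is_increasing):
--     # check the difference is valid
--     if (abs(diff) == 0 or abs(diff) > 3):
--         # difference if invalid
--         return False
--     else:
--         # difference if valid
--         # ensure the whole line in increasing or decreasing
--         if ((is_increasing and diff < 0)
--             or (is_increasing == False and diff > 0)):
--             return False
--         else:
--             return True
--
-- def is_line_safe(line):
--     count = len(line)
--     index = 0
--     is_increasing = False
--
--     while index < count - 1:
--         diff = (line[index + 1]) - (line[index])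
--
--         if (index == 0):
--             if (diff > 0):
--                 is_increasing = True
--
--         valid = is_diff_valid(diff, is_increasing)
--         if (valid == False):
--             return False
--             break
--
--         # increment index for while loop
--         index += 1
--
--     return True
-- ===== SOURCE B (Python) =====
-- def is_line_safe(line):
--     diffs = [b - a for a, b in zip(line, line[1:])]
--     return (all(1 <= abs(d) <= 3 for d in diffs)
--             and (all(d > 0 for d in diffs) or all(d < 0 for d in diffs)))
-- ===== Notes on version B (the rewrite author's own statement) =====
-- stated objective: idiomatic
-- what changed: Replaced the index-based while loop with its is_increasing state variable (set from the first difference) by an aggregate formulation: build the adjacent-difference list once and test it with all() for the magnitude bound and for all-positive-or-all-negative.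
import Mathlib
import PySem

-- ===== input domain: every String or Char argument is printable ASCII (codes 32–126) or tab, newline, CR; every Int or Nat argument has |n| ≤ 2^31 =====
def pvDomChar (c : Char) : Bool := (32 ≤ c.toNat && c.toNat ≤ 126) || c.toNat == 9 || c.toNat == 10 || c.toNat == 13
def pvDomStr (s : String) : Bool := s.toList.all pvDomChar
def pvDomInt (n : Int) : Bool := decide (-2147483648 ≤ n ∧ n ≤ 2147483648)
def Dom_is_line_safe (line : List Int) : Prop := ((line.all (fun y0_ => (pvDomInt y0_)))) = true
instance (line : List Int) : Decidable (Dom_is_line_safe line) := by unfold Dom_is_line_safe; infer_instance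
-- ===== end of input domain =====

-- B replaces A's index-based while loop and is_increasing state variable by an aggregate check over the adjacent-difference list (idiomatic; same O(n) cost).


-- ===== PORT A =====
-- helper is_diff_valid, transliterated
def isDiffValid (diff : Int) (isInc : Bool) : Bool :=
  if |diff| = 0 || |diff| > 3 then false
  else if (isInc && decide (diff < 0)) || (!isInc && decide (diff > 0)) then false
  else true

-- the while loop of A; indices are always in range, so getD's default is never used
def isLineSafeGo (line : List Int) (count : Nat) (index : Nat) (isInc : Bool) : Bool :=
  if index < count - 1 then
    let diff := line.getD (index + 1) 0 - line.getD index 0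
    let isInc' := if index = 0 then (if diff > 0 then true else isInc) else isInc
    if isDiffValid diff isInc' = false then false
    else isLineSafeGo line count (index + 1) isInc'
  else true
termination_by count - index

def is_line_safe (line : List Int) : Bool :=
  isLineSafeGo line line.length 0 false

-- ===== PORT B =====
def diffsOf (line : List Int) : List Int :=
  (line.zip line.tail).map (fun p => p.2 - p.1)

def is_line_safe_alt (line : List Int) : Bool :=
  let diffs := diffsOf line
  (diffs.all (fun d => decide (1 ≤ |d|) && decide (|d| ≤ 3))) &&
  ((diffs.all (fun d => decide (d > 0))) || (diffs.all (fun d => decide (d < 0))))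

-- ===== PRECONDITION & SPEC =====
def Spec_is_line_safe (line : List Int) (out : Bool) : Prop := out = is_line_safe_alt line
instance (line : List Int) (out : Bool) : Decidable (Spec_is_line_safe line out) := by unfold Spec_is_line_safe; infer_instance

-- ===== CLAIM (what is proved, stated in full; the proofs are below) =====
def Claim_equal_is_line_safe : Prop := ∀ (line : List Int), Dom_is_line_safe line → Spec_is_line_safe line (is_line_safe line)

-- ===== LEMMAS AND PROOFS =====


-- structural reformulation of A's loop used only in the proofs
def chk (isInc : Bool) : List Int → Bool
  | a :: b :: rest => isDiffValid (b - a) isInc && chk isInc (b :: rest)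
  | _ => true

lemma chk_short (isInc : Bool) (l : List Int) (h : l.length ≤ 1) : chk isInc l = true := by
  match l with
  | [] => rfl
  | [a] => rfl
  | a :: b :: rest => simp at h

lemma ite_false_and (x c : Bool) : (if x = false then false else c) = (x && c) := by
  cases x <;> simp

lemma go_eq_chk : ∀ (fuel : Nat) (line : List Int) (index : Nat) (isInc : Bool),
    fuel = line.length - index → 1 ≤ index →
    isLineSafeGo line line.length index isInc = chk isInc (line.drop index) := by
  intro fuel
  induction fuel with
  | zero =>
    intro line index isInc hf hi
    rw [isLineSafeGo]
    have h1 : ¬ index < line.length - 1 := by omega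
    rw [if_neg h1]
    rw [chk_short _ _ (by simp; omega)]
  | succ n ih =>
    intro line index isInc hf hi
    rw [isLineSafeGo]
    by_cases h1 : index < line.length - 1
    · rw [if_pos h1]
      have hne : ¬ index = 0 := by omega
      have hlt : index < line.length := by omega
      have hlt1 : index + 1 < line.length := by omega
      simp only [if_neg hne]
      rw [List.getD_eq_getElem line 0 hlt1, List.getD_eq_getElem line 0 hlt]
      rw [List.drop_eq_getElem_cons hlt, List.drop_eq_getElem_cons hlt1]
      simp only [chk]
      rw [← List.drop_eq_getElem_cons hlt1]
      have hih := ih line (index + 1) isInc (by omega) (by omega)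
      rw [hih]
      exact ite_false_and _ _
    · rw [if_neg h1, chk_short _ _ (by simp; omega)]

lemma diffsOf_cons2 (a b : Int) (rest : List Int) :
    diffsOf (a :: b :: rest) = (b - a) :: diffsOf (b :: rest) := by
  simp [diffsOf]

lemma chk_all (isInc : Bool) : ∀ l : List Int,
    chk isInc l = (diffsOf l).all (fun d => isDiffValid d isInc)
  | [] => by simp [chk, diffsOf]
  | [a] => by simp [chk, diffsOf]
  | a :: b :: rest => by
      rw [diffsOf_cons2, List.all_cons, ← chk_all isInc (b :: rest)]
      simp [chk]

lemma dv_true (d : Int) :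
    isDiffValid d true = ((decide (1 ≤ |d|) && decide (|d| ≤ 3)) && decide (d > 0)) := by
  by_cases h : 0 ≤ d
  · simp only [isDiffValid, abs_of_nonneg h]
    split_ifs <;> simp_all <;> omega
  · simp only [isDiffValid, abs_of_neg (by omega : d < 0)]
    split_ifs <;> simp_all <;> omega

lemma dv_false (d : Int) :
    isDiffValid d false = ((decide (1 ≤ |d|) && decide (|d| ≤ 3)) && decide (d < 0)) := by
  by_cases h : 0 ≤ d
  · simp only [isDiffValid, abs_of_nonneg h]
    split_ifs <;> simp_all <;> omega
  · simp only [isDiffValid, abs_of_neg (by omega : d < 0)]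
    split_ifs <;> simp_all <;> omega

lemma all_and_split (p q : Int → Bool) (l : List Int) :
    l.all (fun d => p d && q d) = (l.all p && l.all q) := by
  induction l with
  | nil => rfl
  | cons a t ih =>
    simp only [List.all_cons, ih]
    cases p a <;> cases q a <;> cases t.all p <;> cases t.all q <;> simp

-- A on a line of length ≥ 2 equals an `all` over the difference list, with the
-- direction fixed by the first difference
lemma A_char (a b : Int) (rest : List Int) :
    is_line_safe (a :: b :: rest)
      = ((b - a) :: diffsOf (b :: rest)).all
          (fun d => isDiffValid d (decide (b - a > 0))) := by
  unfold is_line_safe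
  rw [isLineSafeGo]
  have h1 : (0 : Nat) < (a :: b :: rest).length - 1 := by simp
  rw [if_pos h1]
  have hgo := go_eq_chk ((a :: b :: rest).length - 1) (a :: b :: rest) 1
  simp only [List.getD_cons_succ, List.getD_cons_zero, Nat.zero_add, if_true]
  have hinc : (if b - a > 0 then true else false) = decide (b - a > 0) := by
    split_ifs with h <;> simp <;> omega
  rw [hinc]
  have hgo1 := hgo (decide (b - a > 0)) rfl (by omega)
  rw [hgo1]
  have hdrop : (a :: b :: rest).drop 1 = b :: rest := rfl
  rw [hdrop, chk_all, List.all_cons]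
  exact ite_false_and _ _

theorem is_line_safe_spec : Claim_equal_is_line_safe := by
  intro line _
  unfold Spec_is_line_safe
  match line with
  | [] =>
    unfold is_line_safe
    rw [isLineSafeGo]
    simp [is_line_safe_alt, diffsOf]
  | [a] =>
    unfold is_line_safe
    rw [isLineSafeGo]
    simp [is_line_safe_alt, diffsOf]
  | a :: b :: rest =>
    rw [A_char]
    unfold is_line_safe_alt
    rw [diffsOf_cons2]
    by_cases hpos : (0 : Int) < b - a
    · have hd : decide (b - a > 0) = true := by simp only [decide_eq_true_eq]; omega
      rw [hd]
      simp only [dv_true]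
      rw [all_and_split]
      have hneg : (((b - a) :: diffsOf (b :: rest)).all fun d => decide (d < 0)) = false := by
        simp only [List.all_cons]
        simp [show ¬ b - a < 0 from by omega]
      rw [hneg]
      simp
    · have hd : decide (b - a > 0) = false := by simp only [decide_eq_false_iff_not]; omega
      rw [hd]
      simp only [dv_false]
      rw [all_and_split]
      have hp : (((b - a) :: diffsOf (b :: rest)).all fun d => decide (d > 0)) = false := by
        simp only [List.all_cons]
        simp
        omega
      rw [hp]
      simp
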